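-- pv_equiv track=rewrite | github.com/vortex1337/some_python_scripts | spy_game.py | spy_game
-- ===== SOURCE A (Python) =====
-- def spy_game(arr):
--     arr=[str(x) for x in arr]
--     result = ''
--     for el in arr:
--         if el == '0':
--             result+=el
--         if el == '7':
--             result += el
--             break
--     return result == '007'
-- ===== SOURCE B (Python) =====
-- def spy_game(arr):
--     s = [str(x) for x in arr]
--     if '7' not in s:
--         return False
--     return s[:s.index('7')].count('0') == 2
-- ===== Notes on version B (the rewrite author's own statement) =====
-- stated objective: simpler
-- what changed: Replaces the accumulate-a-string-then-compare loop with locate the first '7' (list.index) and count '0's in the prefix before it; no string is built.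
import Mathlib
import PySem

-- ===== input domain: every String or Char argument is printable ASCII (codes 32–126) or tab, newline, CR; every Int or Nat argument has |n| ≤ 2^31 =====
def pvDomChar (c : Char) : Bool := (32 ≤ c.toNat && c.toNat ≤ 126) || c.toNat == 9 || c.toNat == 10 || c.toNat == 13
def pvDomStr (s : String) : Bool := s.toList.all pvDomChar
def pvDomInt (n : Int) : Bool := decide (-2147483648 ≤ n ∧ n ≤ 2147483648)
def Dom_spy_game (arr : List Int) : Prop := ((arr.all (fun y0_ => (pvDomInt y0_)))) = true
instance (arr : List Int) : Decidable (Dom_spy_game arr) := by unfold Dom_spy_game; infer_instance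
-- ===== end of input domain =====

-- B is simpler: it locates the first "7" and counts "0"s in the prefix before it, instead of
-- accumulating a string in a break-ing loop. Same O(n) cost.

-- ===== PORT A =====
-- A's loop with break; the accumulated Python string 'result' is carried as List Char
-- (exact: only '0'/'7' characters are ever appended, compared to '007' at the end).
def spyA_go : List String → List Char → List Char
  | [], res => res
  | el :: rest, res =>
    let res1 := if el = "0" then res ++ el.toList else res
    if el = "7" then res1 ++ el.toList else spyA_go rest res1

def spy_game (arr : List Int) : Bool :=
  let s := arr.map PySem.Int.toStr
  decide (spyA_go s [] = ['0', '0', '7'])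

-- ===== PORT B =====
def spy_game_alt (arr : List Int) : Bool :=
  let s := arr.map PySem.Int.toStr
  match PySem.List.index? s "7" with
  | none => false
  | some i => decide ((PySem.List.slice s none (some (i : Int))).count "0" = 2)

-- ===== PRECONDITION & SPEC =====
def Spec_spy_game (arr : List Int) (out : Bool) : Prop := out = spy_game_alt arr
instance (arr : List Int) (out : Bool) : Decidable (Spec_spy_game arr out) := by unfold Spec_spy_game; infer_instance

-- ===== CLAIM (what is proved, stated in full; the proofs are below) =====
def Claim_equal_spy_game : Prop := ∀ (arr : List Int), Dom_spy_game arr → Spec_spy_game arr (spy_game arr)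

-- ===== LEMMAS AND PROOFS =====

-- the accumulator only prepends
theorem spyA_go_append (ls : List String) (res : List Char) :
    spyA_go ls res = res ++ spyA_go ls [] := by
  induction ls generalizing res with
  | nil => simp [spyA_go]
  | cons el rest ih =>
    by_cases h0 : el = "0"
    · subst h0
      simp [spyA_go]
      rw [ih (res ++ ['0']), ih ['0']]
      simp
    · by_cases h7 : el = "7"
      · subst h7; simp [spyA_go]
      · simp [spyA_go, h0, h7, ih res]

-- when no "7" occurs, the accumulated string contains no '7', so it is never "007"
theorem spyA_go_no7 (ls : List String) (h : "7" ∉ ls) :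
    '7' ∉ spyA_go ls [] := by
  induction ls with
  | nil => simp [spyA_go]
  | cons el rest ih =>
    have hel7 : el ≠ "7" := fun he => h (he ▸ List.mem_cons_self)
    have hrest : "7" ∉ rest := fun hm => h (List.mem_cons_of_mem _ hm)
    by_cases h0 : el = "0"
    · subst h0
      rw [spyA_go, if_pos rfl, if_neg hel7, spyA_go_append]
      simpa using ih hrest
    · rw [spyA_go, if_neg h0, if_neg hel7]
      exact ih hrest

-- characterisation on a list whose first "7" is at position pre.length
theorem spyA_go_split (pre suf : List String) (h7 : "7" ∉ pre) :
    spyA_go (pre ++ "7" :: suf) [] = List.replicate (pre.count "0") '0' ++ ['7'] := by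
  induction pre with
  | nil => simp [spyA_go]
  | cons el rest ih =>
    have hel7 : el ≠ "7" := fun he => h7 (he ▸ List.mem_cons_self)
    have hrest : "7" ∉ rest := fun hm => h7 (List.mem_cons_of_mem _ hm)
    by_cases h0 : el = "0"
    · subst h0
      rw [List.cons_append, spyA_go, if_pos rfl, if_neg hel7, spyA_go_append, ih hrest]
      simp [List.replicate_succ]
    · rw [List.cons_append, spyA_go, if_neg h0, if_neg hel7, ih hrest]
      have : ¬ (el == "0") := by simpa using h0
      simp [List.count_cons, this]

theorem replicate_append_seven (k : Nat) :
    (List.replicate k '0' ++ ['7'] = ['0', '0', '7']) ↔ k = 2 := by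
  constructor
  · intro h
    have := congrArg List.length h
    simpa using this
  · rintro rfl; rfl

-- the core equivalence, over the mapped list of strings
theorem core (ls : List String) :
    decide (spyA_go ls [] = ['0', '0', '7']) =
      (match PySem.List.index? ls "7" with
       | none => false
       | some i => decide ((PySem.List.slice ls none (some (i : Int))).count "0" = 2)) := by
  cases hidx : PySem.List.index? ls "7" with
  | none =>
    have hmem : "7" ∉ ls := (PySem.List.index?_eq_none_iff _ _).1 hidx
    have h7 := spyA_go_no7 ls hmem
    simp only [decide_eq_false_iff_not]
    intro he
    exact h7 (by rw [he]; decide)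
  | some i =>
    obtain ⟨pre, suf, hls, hlen, hpre⟩ := (PySem.List.index?_eq_some_iff ls "7" i).1 hidx
    subst hls
    subst hlen
    dsimp only
    rw [spyA_go_split pre suf hpre, PySem.List.slice_to_natCast,
      List.take_append_of_le_length (le_refl _)]
    rw [List.take_length]
    rcases (replicate_append_seven (pre.count "0")) with ⟨h1, h2⟩
    by_cases hc : pre.count "0" = 2
    · simp [hc]
    · simp [hc]
      intro he
      exact hc (h1 he)

-- ===== VERDICT (by name: the statement is the Claim_ definition above) =====
theorem spy_game_spec : Claim_equal_spy_game := by
  intro arr _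
  unfold Spec_spy_game spy_game spy_game_alt
  exact core (arr.map PySem.Int.toStr)
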